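-- pv_equiv track=rewrite | github.com/Audiokinetic-Automotive/AkVHALInjector | AkVHALInjector/AkVHALInjector.py | _wrapBytesInInt64
-- ===== SOURCE A (Python) =====
-- def _wrapBytesInInt64(data):
--     if isinstance(data, str):
--         data = data.encode('utf-8')
--     dataLength = len(data)
--     if dataLength % 8 != 0:
--         padding = 8 - (dataLength % 8)
--         data += b"\0" * padding
--     elif isinstance(data, str):
--         data = data + b"\0"
--     data = [int.from_bytes(data[i:i+8], byteorder='little', signed=True) for i in range(0, len(data), 8)]
--     data = [dataLength] + data
--     return data
-- ===== SOURCE B (Python) =====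
-- def _wrapBytesInInt64(data):
--     # Single pass over the bytes with a positional accumulator: no padding buffer,
--     # no slicing, no per-chunk int.from_bytes.
--     if isinstance(data, str):
--         data = data.encode('utf-8')
--     out = [len(data)]
--     val = 0
--     mult = 1
--     for b in data:
--         val += b * mult
--         mult <<= 8
--         if mult == 1 << 64:
--             if val >= 1 << 63:
--                 val -= 1 << 64
--             out.append(val)
--             val = 0
--             mult = 1
--     if mult != 1:
--         out.append(val)  # final partial chunk: missing high bytes are zero
--     return out
-- ===== Notes on version B (the rewrite author's own statement) =====
-- stated objective: alternative
-- what changed: A builds a zero-padded copy of the buffer and decodes each 8-byte slice with int.from_bytes inside a range-step comprehension; B makes a single pass over the raw bytes with a positional accumulator (val, mult), emitting each completed int64 on the fly and flushing the final partial chunk without ever materialising padding or slices.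
import Mathlib
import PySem

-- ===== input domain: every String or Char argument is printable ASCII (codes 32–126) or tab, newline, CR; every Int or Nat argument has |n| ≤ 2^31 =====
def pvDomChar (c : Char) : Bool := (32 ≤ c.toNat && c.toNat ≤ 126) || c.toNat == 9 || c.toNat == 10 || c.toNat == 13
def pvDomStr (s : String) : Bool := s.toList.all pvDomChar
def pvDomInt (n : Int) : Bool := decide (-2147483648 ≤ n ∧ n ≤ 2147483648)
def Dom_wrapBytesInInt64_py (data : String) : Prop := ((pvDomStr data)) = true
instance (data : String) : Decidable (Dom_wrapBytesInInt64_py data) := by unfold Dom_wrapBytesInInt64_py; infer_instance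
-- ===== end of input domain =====

-- B replaces A's pad/slice/int.from_bytes comprehension by a single pass over the bytes
-- with a positional accumulator (objective: alternative, same asymptotic cost).


-- ===== PORT A =====
-- data.encode('utf-8'): exact on the ASCII-only domain (every char is one byte = its code)
def pvEncode (s : String) : List Nat := s.toList.map Char.toNat

-- int.from_bytes(l, byteorder='little', signed=True), hand-ported (exact for any length)
def pvFromBytesLESigned (l : List Nat) : Int :=
  let u : Int := l.foldr (fun b acc => (b : Int) + 256 * acc) 0
  if 2 * u ≥ 2 ^ (8 * l.length) then u - 2 ^ (8 * l.length) else u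

def wrapBytesInInt64_py (data : String) : List Int :=
  let bs : List Nat := pvEncode data
  let dataLength := bs.length
  -- the 'elif isinstance(data, str)' branch is dead (data is bytes by then); it adds nothing
  let bs := if dataLength % 8 ≠ 0 then bs ++ List.replicate (8 - dataLength % 8) 0 else bs
  let chunks := (PySem.List.pyRange 0 (bs.length : Int) 8).map
      (fun i => pvFromBytesLESigned (PySem.List.slice bs (some i) (some (i + 8))))
  (dataLength : Int) :: chunks

-- ===== PORT B =====
-- loop body of Source B: state (out, val, mult)
def pvStepB (s : List Int × Int × Int) (b : Nat) : List Int × Int × Int :=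
  let out := s.1
  let val := s.2.1 + (b : Int) * s.2.2
  let mult := s.2.2 * 256          -- mult <<= 8
  if mult = 2 ^ 64 then
    (out ++ [if val ≥ 2 ^ 63 then val - 2 ^ 64 else val], 0, 1)
  else
    (out, val, mult)

def wrapBytesInInt64_py_alt (data : String) : List Int :=
  let bs : List Nat := pvEncode data
  let r := bs.foldl pvStepB ([(bs.length : Int)], 0, 1)
  if r.2.2 ≠ 1 then r.1 ++ [r.2.1] else r.1

-- ===== PRECONDITION & SPEC =====
def Spec_wrapBytesInInt64_py (data : String) (out : List Int) : Prop := out = wrapBytesInInt64_py_alt data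
instance (data : String) (out : List Int) : Decidable (Spec_wrapBytesInInt64_py data out) := by unfold Spec_wrapBytesInInt64_py; infer_instance

-- ===== CLAIM (what is proved, stated in full; the proofs are below) =====
def Claim_equal_wrapBytesInInt64_py : Prop := ∀ (data : String), Dom_wrapBytesInInt64_py data → Spec_wrapBytesInInt64_py data (wrapBytesInInt64_py data)

-- ===== LEMMAS AND PROOFS =====

-- unsigned little-endian value of a byte list
def pvLE (l : List Nat) : Int := l.foldr (fun b acc => (b : Int) + 256 * acc) 0

-- reference chunking: little-endian value of each 8-byte group (last group implicitly zero-padded)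
def pvChunks : List Nat → List Int
  | [] => []
  | b :: t => pvLE (b :: t.take 7) :: pvChunks (t.drop 7)
termination_by l => l.length
decreasing_by simp

-- finalize B's fold state (proof-side name for the tail of port B)
def pvFin (r : List Int × Int × Int) : List Int := if r.2.2 ≠ 1 then r.1 ++ [r.2.1] else r.1

theorem pvLE_nil : pvLE [] = 0 := rfl
theorem pvLE_cons (b : Nat) (t : List Nat) : pvLE (b :: t) = (b : Int) + 256 * pvLE t := rfl
theorem pvChunks_nil : pvChunks [] = [] := by unfold pvChunks; rfl
theorem pvChunks_cons (b : Nat) (t : List Nat) :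
    pvChunks (b :: t) = pvLE (b :: t.take 7) :: pvChunks (t.drop 7) := pvChunks.eq_2 b t

theorem pvLE_nonneg (l : List Nat) : 0 ≤ pvLE l := by
  induction l with
  | nil => simp [pvLE_nil]
  | cons b t ih => rw [pvLE_cons]; positivity

theorem pvLE_lt (l : List Nat) (h : ∀ b ∈ l, b < 128) :
    2 * pvLE l < 2 ^ (8 * l.length) := by
  induction l with
  | nil => simp [pvLE_nil]
  | cons b t ih =>
    have hb : b < 128 := h b (by simp)
    have ht := ih (fun x hx => h x (by simp [hx]))
    rw [pvLE_cons]
    have hpw : (2:Int) ^ (8 * (b :: t).length) = 2 ^ (8 * t.length) * 256 := by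
      rw [List.length_cons, Nat.mul_add, pow_add]; norm_num
    rw [hpw]
    have hb' : (b : Int) ≤ 127 := by exact_mod_cast Nat.le_of_lt_succ hb
    nlinarith [pvLE_nonneg t]

theorem pvLE_replicate_zero (k : Nat) : pvLE (List.replicate k 0) = 0 := by
  induction k with
  | zero => rfl
  | succ m ih => rw [List.replicate_succ, pvLE_cons, ih]; norm_num

theorem pvLE_append_replicate_zero (l : List Nat) (k : Nat) :
    pvLE (l ++ List.replicate k 0) = pvLE l := by
  induction l with
  | nil => simpa using pvLE_replicate_zero k
  | cons b t ih => simp only [List.cons_append, pvLE_cons, ih]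

theorem pvFromBytesLESigned_eq_pvLE (l : List Nat) (h : ∀ b ∈ l, b < 128) :
    pvFromBytesLESigned l = pvLE l := by
  have := pvLE_lt l h
  simp only [pvFromBytesLESigned, pvLE] at *
  rw [if_neg (by omega)]

theorem pvChunks_cons8 (c t : List Nat) (hc : c.length = 8) :
    pvChunks (c ++ t) = pvLE c :: pvChunks t := by
  match c, hc with
  | b :: r, hc =>
    rw [List.cons_append, pvChunks_cons]
    have hr : r.length = 7 := by simpa using hc
    have h1 : (r ++ t).take 7 = r := by
      rw [List.take_append_of_le_length (by omega), List.take_of_length_le (by omega)]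
    have h2 : (r ++ t).drop 7 = t := by
      rw [List.drop_append_of_le_length (by omega), List.drop_of_length_le (by omega)]
      simp
    rw [h1, h2]

theorem pvChunks_short (c : List Nat) (h0 : c ≠ []) (h8 : c.length ≤ 8) :
    pvChunks c = [pvLE c] := by
  match c, h0 with
  | b :: t, _ =>
    rw [pvChunks_cons]
    have ht : t.length ≤ 7 := by simp only [List.length_cons] at h8; omega
    rw [List.take_of_length_le ht, List.drop_of_length_le ht, pvChunks_nil]

-- padding with < 8 zeros to the next multiple of 8 does not change the chunk values
theorem pvChunks_pad : ∀ (n : Nat) (bs : List Nat), bs.length ≤ n → bs.length % 8 ≠ 0 →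
    pvChunks (bs ++ List.replicate (8 - bs.length % 8) 0) = pvChunks bs := by
  intro n
  induction n using Nat.strong_induction_on with
  | _ n ih =>
  intro bs hn h
  by_cases hlen : bs.length < 8
  · have h0 : bs ≠ [] := by intro he; subst he; simp at h
    have hmod : bs.length % 8 = bs.length := Nat.mod_eq_of_lt hlen
    rw [pvChunks_short bs h0 (by omega)]
    rw [pvChunks_short _ (by simp [h0]) (by simp [hmod]; omega)]
    rw [pvLE_append_replicate_zero]
  · generalize hz : List.replicate (8 - bs.length % 8) 0 = z
    have hsplit : bs = bs.take 8 ++ bs.drop 8 := (List.take_append_drop 8 bs).symm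
    have hlen8 : (bs.take 8).length = 8 := by simp; omega
    have hdlen : (bs.drop 8).length = bs.length - 8 := by simp
    have hdm : (bs.drop 8).length % 8 ≠ 0 := by rw [hdlen]; omega
    have hz' : List.replicate (8 - (bs.drop 8).length % 8) 0 = z := by
      rw [← hz]; congr 1; rw [hdlen]; omega
    have hn' : (bs.drop 8).length ≤ n - 8 := by omega
    have hrec := ih (n - 8) (by omega) (bs.drop 8) hn' hdm
    rw [hz'] at hrec
    conv_lhs => rw [hsplit, List.append_assoc]
    rw [pvChunks_cons8 _ _ hlen8, hrec, ← pvChunks_cons8 _ _ hlen8, ← hsplit]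

-- A's slice comprehension over a zero-padded multiple-of-8 list is the reference chunking
theorem chunkA_eq_pvChunks (m : Nat) (p : List Nat) (hp : p.length = 8 * m) :
    (List.range m).map (fun k => pvLE ((p.drop (8 * k)).take 8)) = pvChunks p := by
  induction m generalizing p with
  | zero =>
    have : p = [] := List.eq_nil_of_length_eq_zero (by omega)
    subst this; simp [pvChunks_nil]
  | succ m ih =>
    have hsplit : p = p.take 8 ++ p.drop 8 := (List.take_append_drop 8 p).symm
    have hlen8 : (p.take 8).length = 8 := by simp; omega
    rw [List.range_succ_eq_map, List.map_cons, List.map_map]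
    have h0 : (p.drop (8 * 0)).take 8 = p.take 8 := by simp
    have hmap : (List.range m).map ((fun k => pvLE ((p.drop (8 * k)).take 8)) ∘ Nat.succ)
        = (List.range m).map (fun k => pvLE (((p.drop 8).drop (8 * k)).take 8)) := by
      apply List.map_congr_left; intro k _
      have h88 : 8 * Nat.succ k = 8 * k + 8 := by omega
      simp only [Function.comp, h88, List.drop_drop]
      rw [Nat.add_comm 8 (8 * k)]
    rw [h0, hmap, ih (p.drop 8) (by simp; omega)]
    conv_rhs => rw [hsplit]
    rw [pvChunks_cons8 _ _ hlen8]

-- the slice in port A, in drop/take form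
theorem slice_block (p : List Nat) (k : Nat) :
    PySem.List.slice p (some (8 * (k : Int))) (some (8 * (k : Int) + 8)) = (p.drop (8 * k)).take 8 := by
  have := PySem.List.slice_natCast_add p (8 * k) 8
  push_cast at this
  exact this

-- Port A computes the length followed by the reference chunks of the raw bytes
theorem portA_eq (data : String) (h : ∀ b ∈ pvEncode data, b < 128) :
    wrapBytesInInt64_py data = ((pvEncode data).length : Int) :: pvChunks (pvEncode data) := by
  unfold wrapBytesInInt64_py
  set bs := pvEncode data with hbs
  simp only []
  set p := if bs.length % 8 ≠ 0 then bs ++ List.replicate (8 - bs.length % 8) 0 else bs with hp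
  have hdvd : 8 ∣ p.length := by
    rw [hp]; split_ifs with hm
    · simp; omega
    · omega
  have hpb : ∀ b ∈ p, b < 128 := by
    intro b hb
    rw [hp] at hb
    split_ifs at hb with hm
    · rcases List.mem_append.mp hb with h1 | h2
      · exact h b h1
      · have := List.eq_of_mem_replicate h2; omega
    · exact h b hb
  obtain ⟨m, hm⟩ := hdvd
  refine congrArg (List.cons _) ?_
  have hcount : PySem.List.pyRange 0 (p.length : Int) 8
      = (List.range m).map (fun k : Nat => (0 : Int) + 8 * (k : Int)) := by
    rw [PySem.List.pyRange_of_pos 0 (p.length : Int) (by norm_num)]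
    have hdiv : (((8 * m : Nat) : Int) - 0 + 8 - 1) / 8 = (m : Int) := by
      have he : (((8 * m : Nat) : Int) - 0 + 8 - 1) = 7 + (m : Int) * 8 := by push_cast; ring
      rw [he, Int.add_mul_ediv_right _ _ (by norm_num)]
      norm_num
    have hcnt : (if (0:Int) < (p.length : Int) then (((p.length : Int) - 0 + 8 - 1) / 8).toNat else 0) = m := by
      rw [hm]
      split_ifs with hpos
      · rw [hdiv]; simp
      · have : m = 0 := by push_cast at hpos; omega
        simp [this]
    rw [hcnt]
  rw [hcount, List.map_map]
  have hcong : ∀ k ∈ List.range m,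
      ((fun i => pvFromBytesLESigned (PySem.List.slice p (some i) (some (i + 8)))) ∘
        fun k : Nat => (0 : Int) + 8 * (k : Int)) k
      = pvLE ((p.drop (8 * k)).take 8) := by
    intro k _
    simp only [Function.comp, zero_add]
    rw [slice_block]
    apply pvFromBytesLESigned_eq_pvLE
    intro b hb
    exact hpb b (List.mem_of_mem_drop (List.mem_of_mem_take hb))
  rw [List.map_congr_left hcong, chunkA_eq_pvChunks m p hm]
  rw [hp]; split_ifs with hmod
  · exact pvChunks_pad bs.length bs le_rfl hmod
  · rfl

theorem pow256_ne_one (k : Nat) (hk : 0 < k) : (256 : Int) ^ k ≠ 1 := by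
  have : (256 : Int) ^ 1 ≤ 256 ^ k := pow_le_pow_right₀ (by norm_num) hk
  simp at this; omega

theorem pvLE_append_singleton (l : List Nat) (b : Nat) :
    pvLE (l ++ [b]) = pvLE l + (b : Int) * 256 ^ l.length := by
  induction l with
  | nil => simp [pvLE]
  | cons x r ih =>
    simp only [List.cons_append, pvLE_cons, List.length_cons, ih]
    ring

-- B's fold invariant: starting with a partial chunk `pre` already accumulated,
-- the finalized fold emits `out` followed by the chunks of `pre ++ bs`.
theorem foldB_inv (bs : List Nat) (out : List Int) (pre : List Nat)
    (hb : ∀ b ∈ bs, b < 128) (hpb : ∀ b ∈ pre, b < 128) (hpre : pre.length < 8) :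
    pvFin (bs.foldl pvStepB (out, pvLE pre, (256 : Int) ^ pre.length))
      = out ++ pvChunks (pre ++ bs) := by
  induction bs generalizing out pre with
  | nil =>
    simp only [List.foldl_nil, List.append_nil, pvFin]
    by_cases h0 : pre = []
    · subst h0; simp [pvChunks_nil]
    · rw [if_pos (pow256_ne_one pre.length (by cases pre <;> simp_all))]
      rw [pvChunks_short pre h0 (by omega)]
  | cons b t ih =>
    rw [List.foldl_cons]
    have hb' : b < 128 := hb b (by simp)
    have ht : ∀ x ∈ t, x < 128 := fun x hx => hb x (by simp [hx])
    have hpb' : ∀ x ∈ pre ++ [b], x < 128 := by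
      intro x hx
      rcases List.mem_append.mp hx with h1 | h2
      · exact hpb x h1
      · simp at h2; omega
    by_cases h7 : pre.length = 7
    · -- this byte completes a full 8-byte chunk
      have hval : pvLE pre + (b : Int) * 72057594037927936 < 9223372036854775808 := by
        have h1 := pvLE_lt pre hpb
        rw [h7] at h1
        have hb2 : (b : Int) ≤ 127 := by exact_mod_cast Nat.le_of_lt_succ hb'
        have e1 : (2 : Int) ^ (8 * 7) = 72057594037927936 := by norm_num
        rw [e1] at h1
        omega
      have hstep : pvStepB (out, pvLE pre, (256 : Int) ^ pre.length) b
          = (out ++ [pvLE (pre ++ [b])], 0, 1) := by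
        simp only [pvStepB, h7]
        rw [if_pos (by norm_num)]
        have e2 : (256 : Int) ^ 7 = 72057594037927936 := by norm_num
        rw [e2]
        rw [if_neg (by rw [show ((2:Int) ^ 63) = 9223372036854775808 from by norm_num]; omega)]
        rw [pvLE_append_singleton, h7, e2]
      rw [hstep]
      have h8 : (pre ++ [b]).length = 8 := by simp [h7]
      have hrec := ih (out ++ [pvLE (pre ++ [b])]) [] ht (by simp) (by norm_num)
      simp only [pvLE_nil, List.length_nil, pow_zero, List.nil_append] at hrec
      rw [hrec]
      rw [show pre ++ b :: t = (pre ++ [b]) ++ t by simp]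
      rw [pvChunks_cons8 _ _ h8, List.append_assoc]
      rfl
    · have hne : (256 : Int) ^ pre.length * 256 ≠ 2 ^ 64 := by
        have : pre.length ≤ 6 := by omega
        interval_cases h : pre.length <;> norm_num
      have hstep : pvStepB (out, pvLE pre, (256 : Int) ^ pre.length) b
          = (out, pvLE (pre ++ [b]), (256 : Int) ^ (pre ++ [b]).length) := by
        simp only [pvStepB]
        rw [if_neg hne, pvLE_append_singleton]
        simp [pow_succ]
      rw [hstep, ih out (pre ++ [b]) ht hpb' (by simp; omega)]
      rw [List.append_assoc]
      rfl

-- Port B computes the length followed by the reference chunks of the raw bytes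
theorem portB_eq (data : String) (h : ∀ b ∈ pvEncode data, b < 128) :
    wrapBytesInInt64_py_alt data = ((pvEncode data).length : Int) :: pvChunks (pvEncode data) := by
  show pvFin ((pvEncode data).foldl pvStepB ([((pvEncode data).length : Int)], 0, 1))
      = ((pvEncode data).length : Int) :: pvChunks (pvEncode data)
  have := foldB_inv (pvEncode data) [((pvEncode data).length : Int)] []
    h (by simp) (by simp)
  simpa [pvLE_nil] using this

theorem dom_bytes_lt (data : String) (hd : Dom_wrapBytesInInt64_py data) :
    ∀ b ∈ pvEncode data, b < 128 := by
  intro b hb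
  obtain ⟨c, hc, rfl⟩ := List.mem_map.mp hb
  have := List.all_eq_true.mp hd c hc
  simp only [pvDomChar, Bool.or_eq_true, Bool.and_eq_true, decide_eq_true_eq, beq_iff_eq] at this
  omega

-- ===== VERDICT (by name: the statement is the Claim_ definition above) =====
theorem wrapBytesInInt64_py_spec : Claim_equal_wrapBytesInInt64_py := by
  intro data hd
  unfold Spec_wrapBytesInInt64_py
  rw [portA_eq data (dom_bytes_lt data hd), portB_eq data (dom_bytes_lt data hd)]
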